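-- pv_equiv track=rewrite | github.com/roberttoyonaga/daily_byte | lunchtime.py | lunchtime
-- ===== SOURCE A (Python) =====
-- def lunchtime(meal_items):
--     balanced_meals = 0
--     food_counter = 0
--     drink_counter = 0
--
--     for item in meal_items:
--         if item == "F":
--             food_counter += 1
--         elif item == "D":
--             drink_counter += 1
--         if food_counter == drink_counter:
--             food_counter = 0
--             drink_counter = 0
--             balanced_meals += 1
--
--     return balanced_meals
-- ===== SOURCE B (Python) =====
-- def lunchtime(meal_items):
--     # Stack-based cancellation: each "F"/"D" either cancels an opposite item on
--     # top of the stack or is pushed; a meal is balanced exactly when the stack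
--     # is empty after an item.
--     stack = []
--     balanced_meals = 0
--     for item in meal_items:
--         if item == "F" or item == "D":
--             if stack and stack[-1] != item:
--                 stack.pop()
--             else:
--                 stack.append(item)
--         if not stack:
--             balanced_meals += 1
--     return balanced_meals
-- ===== Notes on version B (the rewrite author's own statement) =====
-- stated objective: alternative
-- what changed: Replaces the two reset-on-equality counters with a cancellation stack (parenthesis-matching style): an 'F'/'D' pops an opposite top element or is pushed, and a balanced meal is counted whenever the stack is empty.
import Mathlib
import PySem

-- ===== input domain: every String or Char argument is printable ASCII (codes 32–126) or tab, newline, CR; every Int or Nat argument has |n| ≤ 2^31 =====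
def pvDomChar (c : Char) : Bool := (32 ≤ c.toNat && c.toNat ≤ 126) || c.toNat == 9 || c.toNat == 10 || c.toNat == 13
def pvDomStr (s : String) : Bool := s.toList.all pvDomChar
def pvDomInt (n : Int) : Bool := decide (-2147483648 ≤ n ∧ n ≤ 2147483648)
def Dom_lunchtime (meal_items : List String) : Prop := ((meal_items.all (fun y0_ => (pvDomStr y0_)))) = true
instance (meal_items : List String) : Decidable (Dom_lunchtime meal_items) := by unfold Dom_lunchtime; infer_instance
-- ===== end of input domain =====

-- B replaces the two reset-on-equality counters with a cancellation stack
-- (parenthesis-matching style); objective: alternative.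

-- ===== PORT A =====
-- one iteration of A's loop over state (balanced_meals, food_counter, drink_counter)
def pvStepA (st : Int × Int × Int) (item : String) : Int × Int × Int :=
  let b := st.1
  let f := if item == "F" then st.2.1 + 1 else st.2.1
  let d := if item == "F" then st.2.2 else if item == "D" then st.2.2 + 1 else st.2.2
  if f == d then (b + 1, 0, 0) else (b, f, d)

def lunchtime (meal_items : List String) : Int :=
  (meal_items.foldl pvStepA (0, 0, 0)).1

-- ===== PORT B =====
-- one iteration of B's loop over state (stack, balanced_meals);
-- stack[-1] → getLast?, pop → dropLast, append → ++ [item]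
def pvStepB (st : List String × Int) (item : String) : List String × Int :=
  let stack :=
    if item == "F" || item == "D" then
      match st.1.getLast? with
      | some t => if t != item then st.1.dropLast else st.1 ++ [item]
      | none => st.1 ++ [item]
    else st.1
  (stack, if stack.isEmpty then st.2 + 1 else st.2)

def lunchtime_alt (meal_items : List String) : Int :=
  (meal_items.foldl pvStepB ([], 0)).2

-- ===== PRECONDITION & SPEC =====
def Spec_lunchtime (meal_items : List String) (out : Int) : Prop := out = lunchtime_alt meal_items
instance (meal_items : List String) (out : Int) : Decidable (Spec_lunchtime meal_items out) := by unfold Spec_lunchtime; infer_instance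

-- ===== CLAIM =====
def Claim_equal_lunchtime : Prop := ∀ (meal_items : List String), Dom_lunchtime meal_items → Spec_lunchtime meal_items (lunchtime meal_items)

-- ===== LEMMAS AND PROOFS =====

-- the stack B maintains is determined by A's two counters
def pvCanon (f d : Int) : List String :=
  if d ≤ f then List.replicate (f - d).toNat "F" else List.replicate (d - f).toNat "D"

-- one loop step: B's stack stays the canonical image of A's counters,
-- and both loops increment their meal count together
lemma pv_step (b f d : Int) (x : String) :
    pvStepB (pvCanon f d, b) x
      = (pvCanon (pvStepA (b, f, d) x).2.1 (pvStepA (b, f, d) x).2.2,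
         (pvStepA (b, f, d) x).1) := by
  by_cases hF : x = "F"
  · subst hF
    by_cases hle : d ≤ f
    · have h1 : ¬ ((f : Int) + 1 = d) := by omega
      have h2 : ((f : Int) + 1 - d).toNat = (f - d).toNat + 1 := by omega
      have hle2 : d ≤ (f : Int) + 1 := by omega
      by_cases hn : (f - d).toNat = 0 <;>
        simp [pvStepA, pvStepB, pvCanon, hle, h1, h2, hn, hle2, List.getLast?_replicate,
          List.replicate_succ', List.isEmpty_replicate]
    · by_cases hz : (f : Int) + 1 = d
      · have hn : (d - f).toNat = 1 := by omega
        simp [pvStepA, pvStepB, pvCanon, hle, hz, hn, List.getLast?_replicate,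
          List.dropLast_replicate, List.isEmpty_replicate]
      · have hn0 : ¬ ((d - f).toNat = 0) := by omega
        have hle2 : ¬ (d ≤ f + 1) := by omega
        have h2 : (d - f).toNat - 1 = (d - (f + 1)).toNat := by omega
        have hn1 : ¬ ((d - (f + 1)).toNat = 0) := by omega
        simp [pvStepA, pvStepB, pvCanon, hle, hz, hn0, hle2, h2, hn1,
          List.getLast?_replicate, List.dropLast_replicate, List.isEmpty_replicate]
  · by_cases hD : x = "D"
    · subst hD
      by_cases hle : d ≤ f
      · by_cases hz : (f : Int) = d + 1
        · have hn : (f - d).toNat = 1 := by omega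
          simp [pvStepA, pvStepB, pvCanon, hF, hle, hz, hn, List.getLast?_replicate,
            List.dropLast_replicate, List.isEmpty_replicate]
        · by_cases hfd : (f : Int) = d
          · have hn : (f - d).toNat = 0 := by omega
            have h2 : ((d : Int) + 1 - f).toNat = 1 := by omega
            have hle2 : ¬ ((d : Int) + 1 ≤ f) := by omega
            simp [pvStepA, pvStepB, pvCanon, hF, hle, hz, hfd, hn, h2, hle2,
              List.getLast?_replicate, List.isEmpty_replicate]
          · have hn0 : ¬ ((f - d).toNat = 0) := by omega
            have hle2 : (d : Int) + 1 ≤ f := by omega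
            have h2 : (f - d).toNat - 1 = (f - (d + 1)).toNat := by omega
            have hn1 : ¬ ((f - (d + 1)).toNat = 0) := by omega
            simp [pvStepA, pvStepB, pvCanon, hF, hle, hz, hn0, hle2, h2, hn1,
              List.getLast?_replicate, List.dropLast_replicate, List.isEmpty_replicate]
      · have hz : ¬ ((f : Int) = d + 1) := by omega
        have hle2 : ¬ ((d : Int) + 1 ≤ f) := by omega
        have h2 : ((d : Int) + 1 - f).toNat = (d - f).toNat + 1 := by omega
        by_cases hn : (d - f).toNat = 0 <;>
          simp [pvStepA, pvStepB, pvCanon, hF, hle, hz, hle2, h2, hn,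
            List.getLast?_replicate, List.replicate_succ', List.isEmpty_replicate]
    · by_cases hfd : (f : Int) = d
      · have hn : (f - d).toNat = 0 := by omega
        simp [pvStepA, pvStepB, pvCanon, hF, hD, hfd, hn, List.isEmpty_replicate]
      · by_cases hle : d ≤ f
        · have hn : ¬ ((f - d).toNat = 0) := by omega
          simp [pvStepA, pvStepB, pvCanon, hF, hD, hfd, hle, hn, List.isEmpty_replicate]
        · have hn : ¬ ((d - f).toNat = 0) := by omega
          simp [pvStepA, pvStepB, pvCanon, hF, hD, hfd, hle, hn, List.isEmpty_replicate]

lemma pv_key (xs : List String) (b f d : Int) :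
    (xs.foldl pvStepA (b, f, d)).1 = (xs.foldl pvStepB (pvCanon f d, b)).2 := by
  induction xs generalizing b f d with
  | nil => simp
  | cons x xs ih =>
    simp only [List.foldl_cons]
    rw [pv_step]
    obtain ⟨b', f', d'⟩ := pvStepA (b, f, d) x
    exact ih b' f' d'

-- ===== VERDICT =====
theorem lunchtime_spec : Claim_equal_lunchtime := by
  intro meal_items _
  unfold Spec_lunchtime lunchtime lunchtime_alt
  have h := pv_key meal_items 0 0 0
  simpa [pvCanon] using h
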